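-- pv_equiv track=rewrite | github.com/ikeda042/PhenoPixel6.0 | backend/app/nd2parser/router.py | _get_frame_coords
-- ===== SOURCE A (Python) =====
-- def _get_frame_coords(
--     iter_axes: str, sizes: dict[str, int], frame_idx: int
-- ) -> dict[str, int]:
--     coords: dict[str, int] = {}
--     remainder = frame_idx
--     for axis in reversed(iter_axes):
--         axis_size = int(sizes.get(axis, 1))
--         if axis_size < 1:
--             axis_size = 1
--         coords[axis] = remainder % axis_size
--         remainder //= axis_size
--     return coords
-- ===== SOURCE B (Python) =====
-- def _get_frame_coords(
--     iter_axes: str, sizes: dict[str, int], frame_idx: int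
-- ) -> dict[str, int]:
--     # Pass 1: per position (in reversed order) record the clamped axis size
--     # and the place value (product of sizes already processed).
--     places = []
--     place = 1
--     for axis in reversed(iter_axes):
--         size = int(sizes.get(axis, 1))
--         if size < 1:
--             size = 1
--         places.append((axis, size, place))
--         place *= size
--     # Pass 2: each coordinate is an independent closed form of frame_idx.
--     coords: dict[str, int] = {}
--     for axis, size, place in places:
--         coords[axis] = (frame_idx // place) % size
--     return coords
-- ===== Notes on version B (the rewrite author's own statement) =====
-- stated objective: alternative
-- what changed: Replaces the single remainder-threading loop (coords[axis]=r%s; r//=s) by two passes: one pass precomputes each position's clamped size and suffix-product place value, then each coordinate is computed independently as (frame_idx // place) % size.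
import Mathlib
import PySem

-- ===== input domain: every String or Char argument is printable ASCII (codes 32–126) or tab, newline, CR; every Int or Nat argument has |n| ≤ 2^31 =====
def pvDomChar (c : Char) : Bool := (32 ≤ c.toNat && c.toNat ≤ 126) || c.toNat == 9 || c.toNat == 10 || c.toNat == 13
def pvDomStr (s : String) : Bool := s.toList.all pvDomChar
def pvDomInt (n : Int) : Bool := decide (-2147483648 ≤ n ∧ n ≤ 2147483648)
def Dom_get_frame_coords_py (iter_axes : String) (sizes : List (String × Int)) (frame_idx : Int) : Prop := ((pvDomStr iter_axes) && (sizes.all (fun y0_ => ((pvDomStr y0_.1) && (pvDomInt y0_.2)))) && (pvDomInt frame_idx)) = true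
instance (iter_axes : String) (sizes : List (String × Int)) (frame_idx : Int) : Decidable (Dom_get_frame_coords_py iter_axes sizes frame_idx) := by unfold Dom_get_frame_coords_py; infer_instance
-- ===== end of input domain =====

-- B computes each coordinate independently from precomputed place values instead of threading a remainder; same results, same cost (objective: alternative).

-- ===== PORT A =====
-- A's loop: thread (coords, remainder) over reversed(iter_axes).
def get_frame_coords_py (iter_axes : String) (sizes : List (String × Int)) (frame_idx : Int) : List (String × Int) :=
  let st := iter_axes.toList.reverse.foldl
    (fun (st : PySem.Dict String Int × Int) axis =>
      let axis_size := (PySem.Dict.mk sizes).getD (String.ofList [axis]) 1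
      let axis_size := if axis_size < 1 then 1 else axis_size
      (st.1.insert (String.ofList [axis]) (PySem.Int.mod st.2 axis_size),
       PySem.Int.floordiv st.2 axis_size))
    (PySem.Dict.empty, frame_idx)
  st.1.items

-- ===== PORT B =====
def get_frame_coords_py_alt (iter_axes : String) (sizes : List (String × Int)) (frame_idx : Int) : List (String × Int) :=
  -- pass 1: (axis, clamped size, place value) per position, in reversed order
  let places := (iter_axes.toList.reverse.foldl
    (fun (st : List (Char × Int × Int) × Int) axis =>
      let size := (PySem.Dict.mk sizes).getD (String.ofList [axis]) 1
      let size := if size < 1 then 1 else size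
      (st.1 ++ [(axis, size, st.2)], st.2 * size)) ([], 1)).1
  -- pass 2: each coordinate independently
  (places.foldl
    (fun (coords : PySem.Dict String Int) t =>
      coords.insert (String.ofList [t.1])
        (PySem.Int.mod (PySem.Int.floordiv frame_idx t.2.2) t.2.1))
    PySem.Dict.empty).items

-- ===== PRECONDITION & SPEC =====
def Spec_get_frame_coords_py (iter_axes : String) (sizes : List (String × Int)) (frame_idx : Int) (out : List (String × Int)) : Prop := out = get_frame_coords_py_alt iter_axes sizes frame_idx
instance (iter_axes : String) (sizes : List (String × Int)) (frame_idx : Int) (out : List (String × Int)) : Decidable (Spec_get_frame_coords_py iter_axes sizes frame_idx out) := by unfold Spec_get_frame_coords_py; infer_instance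

-- ===== CLAIM (what is proved, stated in full; the proofs are below) =====
def Claim_equal_get_frame_coords_py : Prop := ∀ (iter_axes : String) (sizes : List (String × Int)) (frame_idx : Int), Dom_get_frame_coords_py iter_axes sizes frame_idx → Spec_get_frame_coords_py iter_axes sizes frame_idx (get_frame_coords_py iter_axes sizes frame_idx)

-- ===== LEMMAS AND PROOFS =====

-- the clamped size at a char, as both ports compute it
def pvSize (sizes : List (String × Int)) (axis : Char) : Int :=
  let s := (PySem.Dict.mk sizes).getD (String.ofList [axis]) 1
  if s < 1 then 1 else s

theorem pvSize_pos (sizes : List (String × Int)) (axis : Char) : 0 < pvSize sizes axis := by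
  unfold pvSize; dsimp only; split_ifs with h <;> omega

-- recursive description of B's first pass
def pvPlaces (sizes : List (String × Int)) : List Char → Int → List (Char × Int × Int)
  | [], _ => []
  | c :: cs, p => (c, pvSize sizes c, p) :: pvPlaces sizes cs (p * pvSize sizes c)

theorem foldl_places (sizes : List (String × Int)) (cs : List Char)
    (acc : List (Char × Int × Int)) (p : Int) :
    (cs.foldl (fun (st : List (Char × Int × Int) × Int) axis =>
      let size := (PySem.Dict.mk sizes).getD (String.ofList [axis]) 1
      let size := if size < 1 then 1 else size
      (st.1 ++ [(axis, size, st.2)], st.2 * size)) (acc, p)).1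
    = acc ++ pvPlaces sizes cs p := by
  induction cs generalizing acc p with
  | nil => simp [pvPlaces]
  | cons c cs ih =>
    simp only [List.foldl_cons, pvPlaces]
    rw [ih]
    simp [pvSize]

theorem fdiv_fdiv (n p s : Int) (hp : 0 < p) (hs : 0 < s) :
    PySem.Int.floordiv (PySem.Int.floordiv n p) s = PySem.Int.floordiv n (p * s) := by
  rw [PySem.Int.floordiv_eq_ediv_of_pos hp, PySem.Int.floordiv_eq_ediv_of_pos hs,
      PySem.Int.floordiv_eq_ediv_of_pos (by positivity)]
  exact Int.ediv_ediv_of_nonneg (le_of_lt hp)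

-- main invariant: A's loop from (d, n // p) equals B's second pass over pvPlaces starting at place p
theorem main_inv (sizes : List (String × Int)) (n : Int) (cs : List Char)
    (d : PySem.Dict String Int) (p : Int) (hp : 0 < p) :
    (cs.foldl
      (fun (st : PySem.Dict String Int × Int) axis =>
        let axis_size := (PySem.Dict.mk sizes).getD (String.ofList [axis]) 1
        let axis_size := if axis_size < 1 then 1 else axis_size
        (st.1.insert (String.ofList [axis]) (PySem.Int.mod st.2 axis_size),
         PySem.Int.floordiv st.2 axis_size))
      (d, PySem.Int.floordiv n p)).1
    = (pvPlaces sizes cs p).foldl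
        (fun (coords : PySem.Dict String Int) t =>
          coords.insert (String.ofList [t.1])
            (PySem.Int.mod (PySem.Int.floordiv n t.2.2) t.2.1)) d := by
  induction cs generalizing d p with
  | nil => simp [pvPlaces]
  | cons c cs ih =>
    have hs := pvSize_pos sizes c
    simp only [List.foldl_cons, pvPlaces]
    rw [show ((if (PySem.Dict.mk sizes).getD (String.ofList [c]) 1 < 1 then 1
        else (PySem.Dict.mk sizes).getD (String.ofList [c]) 1) : Int) = pvSize sizes c from rfl]
    rw [fdiv_fdiv n p (pvSize sizes c) hp hs]
    exact ih _ (p * pvSize sizes c) (by positivity)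

theorem floordiv_one (n : Int) : PySem.Int.floordiv n 1 = n := by
  rw [PySem.Int.floordiv_eq_ediv_of_pos (by norm_num)]; simp

-- ===== VERDICT (by name: the statement is the Claim_ definition above) =====
theorem get_frame_coords_py_spec : Claim_equal_get_frame_coords_py := by
  intro iter_axes sizes frame_idx _
  unfold Spec_get_frame_coords_py get_frame_coords_py get_frame_coords_py_alt
  rw [foldl_places]
  have h := main_inv sizes frame_idx iter_axes.toList.reverse PySem.Dict.empty 1 (by norm_num)
  rw [floordiv_one] at h
  simp only [List.nil_append]
  rw [h]
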